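-- pv_equiv track=rewrite | github.com/garciparedes/python-examples | competitive/hacker_rank/python/strings/designer_door_mat.py | door_mat
-- ===== SOURCE A (Python) =====
-- def generate_row(i, m, middle, corner) -> str:
--     return (middle * (i * 2 + 1)).center(m, corner)
--
-- def door_mat(n: int, m: int, middle=".|.", corner="-") -> str:
--     s = str()
--     for i in range(n // 2):
--         s += generate_row(i, m, middle, corner) + '\n'
--     s += "WELCOME".center(m, "-") + '\n'
--     for i in reversed(range(n // 2)):
--         s += generate_row(i, m, middle, corner) + '\n'
--     return s
-- ===== SOURCE B (Python) =====
-- def door_mat(n: int, m: int, middle=".|.", corner="-") -> str: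
--     k = n // 2
--     def wrap(i):
--         if i >= k:
--             return "WELCOME".center(m, "-") + "\n"
--         row = (middle * (2 * i + 1)).center(m, corner) + "\n"
--         return row + wrap(i + 1) + row
--     return wrap(0)
-- ===== Notes on version B (the rewrite author's own statement) =====
-- stated objective: simpler
-- what changed: B replaces A's two string-accumulating loops (top rows, then a second reversed loop regenerating them) by a single outside-in recursion that computes each symmetric row once and wraps it around the inner mat: wrap(i) = row_i + wrap(i+1) + row_i with the WELCOME line as base case.
import Mathlib
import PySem

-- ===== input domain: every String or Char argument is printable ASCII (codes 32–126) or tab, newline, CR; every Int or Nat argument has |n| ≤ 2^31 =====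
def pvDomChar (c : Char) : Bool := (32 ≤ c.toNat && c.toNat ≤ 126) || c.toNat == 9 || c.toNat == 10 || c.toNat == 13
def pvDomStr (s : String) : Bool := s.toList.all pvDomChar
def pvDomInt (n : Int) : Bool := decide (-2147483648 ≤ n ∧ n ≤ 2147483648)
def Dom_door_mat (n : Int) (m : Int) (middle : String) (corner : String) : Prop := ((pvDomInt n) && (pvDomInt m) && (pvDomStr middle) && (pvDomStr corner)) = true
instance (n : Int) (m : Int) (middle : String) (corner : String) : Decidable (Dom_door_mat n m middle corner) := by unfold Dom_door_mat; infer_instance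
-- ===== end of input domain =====

-- B replaces A's two row-generating loops by a single recursion that builds the mat from the
-- outside in, computing each symmetric row once and placing it at both ends (objective: simpler).

-- Hand port of Python's str.center(w, fill) over List Char (exact for any List Char and Int width;
-- matches CPython: no padding when w ≤ len, extra fill char placement by CPython's left-margin formula).
def pyCenter (s : List Char) (w : Int) (fill : Char) : List Char :=
  if w - (s.length : Int) ≤ 0 then s
  else
    let marg := (w - (s.length : Int)).toNat
    let left := marg / 2 + (marg &&& w.toNat &&& 1)
    List.replicate left fill ++ s ++ List.replicate (marg - left) fill

-- ===== PORT A =====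
-- helper generate_row (fill is corner's single character under Pre_; with n < 2 it is never used)
def genRow (i : Int) (m : Int) (middle : List Char) (fill : Char) : List Char :=
  pyCenter (PySem.List.pyRepeat middle (i * 2 + 1)) m fill

def door_mat (n : Int) (m : Int) (middle : String) (corner : String) : String :=
  let fill := corner.toList.headD ' '
  let s : List Char := []
  let s := (PySem.List.pyRange 0 (PySem.Int.floordiv n 2) 1).foldl
    (fun s i => s ++ genRow i m middle.toList fill ++ ['\n']) s
  let s := s ++ pyCenter "WELCOME".toList m '-' ++ ['\n']
  let s := ((PySem.List.pyRange 0 (PySem.Int.floordiv n 2) 1).reverse).foldl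
    (fun s i => s ++ genRow i m middle.toList fill ++ ['\n']) s
  String.mk s

-- ===== PORT B =====
-- the recursive wrap of Source B: base case WELCOME line, otherwise row ++ wrap(i+1) ++ row
def wrapB (k : Int) (m : Int) (middle : List Char) (fill : Char) (i : Int) : List Char :=
  if k ≤ i then pyCenter "WELCOME".toList m '-' ++ ['\n']
  else
    let row := pyCenter (PySem.List.pyRepeat middle (2 * i + 1)) m fill ++ ['\n']
    row ++ wrapB k m middle fill (i + 1) ++ row
termination_by (k - i).toNat
decreasing_by omega

def door_mat_alt (n : Int) (m : Int) (middle : String) (corner : String) : String :=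
  let fill := corner.toList.headD ' '
  let k := PySem.Int.floordiv n 2
  String.mk (wrapB k m middle.toList fill 0)

-- ===== PRECONDITION & SPEC =====
-- Pre_ excludes only inputs where A raises: with n ≥ 2 the rows call str.center with the corner
-- string as fill, and Python's center raises TypeError unless the fill is exactly one character.
def Pre_door_mat (n : Int) (m : Int) (middle : String) (corner : String) : Prop :=
  corner.toList.length = 1 ∨ n ≤ 1
instance (n : Int) (m : Int) (middle : String) (corner : String) : Decidable (Pre_door_mat n m middle corner) := by unfold Pre_door_mat; infer_instance

def pvWitness_door_mat : Int × Int × String × String := (7, 9, ".|.", "-")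

def Spec_door_mat (n : Int) (m : Int) (middle : String) (corner : String) (out : String) : Prop := out = door_mat_alt n m middle corner
instance (n : Int) (m : Int) (middle : String) (corner : String) (out : String) : Decidable (Spec_door_mat n m middle corner out) := by unfold Spec_door_mat; infer_instance

-- ===== CLAIM (what is proved, stated in full; the proofs are below) =====
def Claim_equal_door_mat : Prop := ∀ (n : Int) (m : Int) (middle : String) (corner : String), Dom_door_mat n m middle corner → Pre_door_mat n m middle corner → Spec_door_mat n m middle corner (door_mat n m middle corner)

-- ===== LEMMAS AND PROOFS =====
-- A's accumulating loop, in closed form: rows concatenated, each followed by '\n'.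
theorem foldl_rows (f : Int → List Char) (l : List Int) (acc : List Char) :
    l.foldl (fun s i => s ++ f i ++ ['\n']) acc
      = acc ++ l.flatMap (fun i => f i ++ ['\n']) := by
  induction l generalizing acc with
  | nil => simp
  | cons a t ih =>
      rw [List.foldl_cons, ih, List.flatMap_cons]
      simp [List.append_assoc]

-- B's outside-in recursion, in the same closed form.
theorem wrapB_eq (k m : Int) (mid : List Char) (fill : Char) (i : Int) :
    wrapB k m mid fill i
      = (PySem.List.pyRange i k 1).flatMap (fun j => genRow j m mid fill ++ ['\n'])
        ++ (pyCenter "WELCOME".toList m '-' ++ ['\n'])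
        ++ ((PySem.List.pyRange i k 1).reverse).flatMap (fun j => genRow j m mid fill ++ ['\n']) := by
  rw [wrapB]
  by_cases h : k ≤ i
  · simp [h, PySem.List.pyRange_one_eq_nil h]
  · have hik : i < k := lt_of_not_ge h
    rw [if_neg h, wrapB_eq k m mid fill (i + 1),
        PySem.List.pyRange_one_cons hik]
    simp [genRow, List.flatMap_append, List.append_assoc, mul_comm]
termination_by (k - i).toNat
decreasing_by omega

-- ===== VERDICT (by name: the statement is the Claim_ definition above) =====
theorem door_mat_spec : Claim_equal_door_mat := by
  intro n m middle corner _ _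
  unfold Spec_door_mat door_mat door_mat_alt
  simp only []
  rw [wrapB_eq, foldl_rows, foldl_rows]
  simp [List.append_assoc]
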